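-- pv_equiv track=rewrite | github.com/TaegyunB/TIL | Algorithm/Problem_Solving/practice/20551_Increasing_Candy_Sequence/20551_Increasing_Candy_Sequence.py | calculate
-- ===== SOURCE A (Python) =====
-- def calculate(A, B, C):
--     cnt = 0
--
--     if A > B and C == 2:  # 어떤 방식으로 먹더라도 사탕의 개수가 순증가 할 수 없으면
--         return -1
--
--     while C <= B:  # C가 B보다 커질 때 까지
--         B -= 1
--         cnt += 1
--
--     while B <= A:  # B가 A보다 커질 때 까지
--         A -= 1
--         cnt += 1
--
--     if A == 0 or B == 0 or C == 0:
--         return -1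
--
--     return cnt
-- ===== SOURCE B (Python) =====
-- def calculate(A, B, C):
--     if A > B and C == 2:
--         return -1
--     b = min(B, C - 1)
--     a = min(A, b - 1)
--     cnt = (B - b) + (A - a)
--     if a == 0 or b == 0 or C == 0:
--         return -1
--     return cnt
-- ===== Notes on version B (the rewrite author's own statement) =====
-- stated objective: faster
-- what changed: Replaced the two decrement-and-count while loops by closed-form arithmetic (b = min(B,C-1), a = min(A,b-1), cnt = (B-b)+(A-a)).
import Mathlib
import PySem

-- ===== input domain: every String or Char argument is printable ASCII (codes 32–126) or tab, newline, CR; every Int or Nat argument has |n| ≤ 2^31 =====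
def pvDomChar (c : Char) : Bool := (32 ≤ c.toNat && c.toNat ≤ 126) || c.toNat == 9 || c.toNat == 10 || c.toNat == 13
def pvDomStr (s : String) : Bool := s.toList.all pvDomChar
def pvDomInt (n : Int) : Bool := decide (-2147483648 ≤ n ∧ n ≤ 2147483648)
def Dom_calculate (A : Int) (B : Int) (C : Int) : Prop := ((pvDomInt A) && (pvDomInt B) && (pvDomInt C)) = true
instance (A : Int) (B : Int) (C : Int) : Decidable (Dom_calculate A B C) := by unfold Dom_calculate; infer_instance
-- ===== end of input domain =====

-- B replaces A's two decrement-and-count loops by closed-form min/subtraction arithmetic (objective: faster, O(1)).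

-- ===== PORT A =====
-- `while C <= B: B -= 1; cnt += 1`
def calcLoopB (B C cnt : Int) : Int × Int :=
  if C ≤ B then calcLoopB (B - 1) C (cnt + 1) else (B, cnt)
termination_by (B - C + 1).toNat
decreasing_by omega

-- `while B <= A: A -= 1; cnt += 1`
def calcLoopA (A B cnt : Int) : Int × Int :=
  if B ≤ A then calcLoopA (A - 1) B (cnt + 1) else (A, cnt)
termination_by (A - B + 1).toNat
decreasing_by omega

def calculate (A : Int) (B : Int) (C : Int) : Int :=
  if A > B ∧ C = 2 then -1
  else
    let p := calcLoopB B C 0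
    let q := calcLoopA A p.1 p.2
    if q.1 = 0 ∨ p.1 = 0 ∨ C = 0 then -1 else q.2

-- ===== PORT B =====
def calculate_alt (A : Int) (B : Int) (C : Int) : Int :=
  if A > B ∧ C = 2 then -1
  else
    let b := min B (C - 1)
    let a := min A (b - 1)
    let cnt := (B - b) + (A - a)
    if a = 0 ∨ b = 0 ∨ C = 0 then -1 else cnt

-- ===== PRECONDITION & SPEC =====
def Spec_calculate (A : Int) (B : Int) (C : Int) (out : Int) : Prop := out = calculate_alt A B C
instance (A : Int) (B : Int) (C : Int) (out : Int) : Decidable (Spec_calculate A B C out) := by unfold Spec_calculate; infer_instance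

-- ===== CLAIM (what is proved, stated in full; the proofs are below) =====
def Claim_equal_calculate : Prop := ∀ (A : Int) (B : Int) (C : Int), Dom_calculate A B C → Spec_calculate A B C (calculate A B C)

-- ===== LEMMAS AND PROOFS =====
theorem calcLoopB_eq (B C cnt : Int) :
    calcLoopB B C cnt = (min B (C - 1), cnt + (B - min B (C - 1))) := by
  fun_induction calcLoopB B C cnt with
  | case1 _ _ _ ih =>
    rw [ih]
    simp only [Prod.mk.injEq]
    omega
  | case2 _ _ _ =>
    simp only [Prod.mk.injEq]
    omega

theorem calcLoopA_eq (A B cnt : Int) :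
    calcLoopA A B cnt = (min A (B - 1), cnt + (A - min A (B - 1))) := by
  fun_induction calcLoopA A B cnt with
  | case1 _ _ _ ih =>
    rw [ih]
    simp only [Prod.mk.injEq]
    omega
  | case2 _ _ _ =>
    simp only [Prod.mk.injEq]
    omega

-- ===== VERDICT (by name: the statement is the Claim_ definition above) =====
theorem calculate_spec : Claim_equal_calculate := by
  intro A B C _
  unfold Spec_calculate calculate calculate_alt
  simp only [calcLoopB_eq, calcLoopA_eq]
  split_ifs <;> first | rfl | omega
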